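-- pv_equiv track=rewrite | github.com/hochej/envwise | analysis/scan.py | fix_regex
-- ===== SOURCE A (Python) =====
-- def fix_regex(pattern: str) -> str:
--     """Fix Go-compatible regex for Python.
--
--     Handles:
--     - end anchor: \\z -> $
--     - inline case flag normalization: (?i)
--     - POSIX character classes inside bracket expressions (e.g. [[:alnum:]])
--     """
--     p = pattern.replace("\\z", "$")
--
--     # Convert common POSIX bracket classes used by upstream regexes.
--     # Python's `re` does not support POSIX classes and may emit FutureWarning
--     # (e.g. "Possible nested set") while changing match semantics.
--     posix_class_map = {
--         "[[:alnum:]]": "[A-Za-z0-9]",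
--         "[[:alpha:]]": "[A-Za-z]",
--         "[[:digit:]]": "[0-9]",
--         "[[:xdigit:]]": "[A-Fa-f0-9]",
--         "[[:lower:]]": "[a-z]",
--         "[[:upper:]]": "[A-Z]",
--         "[[:space:]]": "[\\t\\r\\n\\f\\v ]",
--     }
--     for src, dst in posix_class_map.items():
--         p = p.replace(src, dst)
--
--     if "(?i)" in p:
--         p = p.replace("(?i)", "")
--         p = "(?i)" + p
--
--     return p
-- ===== SOURCE B (Python) =====
-- _TOKENS = [
--     ("\\z", "$"),
--     ("[[:alnum:]]", "[A-Za-z0-9]"),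
--     ("[[:alpha:]]", "[A-Za-z]"),
--     ("[[:digit:]]", "[0-9]"),
--     ("[[:xdigit:]]", "[A-Fa-f0-9]"),
--     ("[[:lower:]]", "[a-z]"),
--     ("[[:upper:]]", "[A-Z]"),
--     ("[[:space:]]", "[\\t\\r\\n\\f\\v ]"),
-- ]
--
--
-- def fix_regex(pattern: str) -> str:
--     """Fix Go-compatible regex for Python (single left-to-right scan)."""
--     out = []
--     i = 0
--     n = len(pattern)
--     while i < n:
--         for src, dst in _TOKENS:
--             if pattern.startswith(src, i):
--                 out.append(dst)
--                 i += len(src)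
--                 break
--         else:
--             out.append(pattern[i])
--             i += 1
--     p = "".join(out)
--     if "(?i)" in p:
--         p = "(?i)" + p.replace("(?i)", "")
--     return p
-- ===== Notes on version B (the rewrite author's own statement) =====
-- stated objective: alternative
-- what changed: The eight sequential whole-string .replace passes (\z plus seven POSIX classes) are replaced by a single left-to-right scan that matches a token table at each position and emits the translation, the (?i) hoist staying as in A.
import Mathlib
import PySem

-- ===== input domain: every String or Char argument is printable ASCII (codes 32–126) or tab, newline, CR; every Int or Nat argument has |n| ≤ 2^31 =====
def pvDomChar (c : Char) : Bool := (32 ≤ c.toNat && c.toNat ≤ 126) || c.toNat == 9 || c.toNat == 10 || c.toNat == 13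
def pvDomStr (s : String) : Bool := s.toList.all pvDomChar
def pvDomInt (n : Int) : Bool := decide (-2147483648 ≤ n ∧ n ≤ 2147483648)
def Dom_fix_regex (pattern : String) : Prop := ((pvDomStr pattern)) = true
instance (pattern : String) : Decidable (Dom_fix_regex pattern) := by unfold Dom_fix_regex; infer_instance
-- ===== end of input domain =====

-- B replaces A's eight sequential whole-string .replace passes by one left-to-right
-- scan over the pattern with a token table (alternative decomposition, same cost).

-- ===== PORT A =====
-- posix_class_map: a dict literal, ported as an association list in insertion order
def pvPosixMap : List (String × String) :=
  [ ("[[:alnum:]]", "[A-Za-z0-9]"),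
    ("[[:alpha:]]", "[A-Za-z]"),
    ("[[:digit:]]", "[0-9]"),
    ("[[:xdigit:]]", "[A-Fa-f0-9]"),
    ("[[:lower:]]", "[a-z]"),
    ("[[:upper:]]", "[A-Z]"),
    ("[[:space:]]", "[\\t\\r\\n\\f\\v ]") ]

def fix_regex (pattern : String) : String :=
  let p := PySem.Str.replace pattern "\\z" "$"
  let p := pvPosixMap.foldl (fun q sd => PySem.Str.replace q sd.1 sd.2) p
  if PySem.Str.isIn "(?i)" p then "(?i)" ++ PySem.Str.replace p "(?i)" "" else p

-- ===== PORT B =====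
-- _TOKENS from Source B
def pvTokens : List (String × String) :=
  [ ("\\z", "$"),
    ("[[:alnum:]]", "[A-Za-z0-9]"),
    ("[[:alpha:]]", "[A-Za-z]"),
    ("[[:digit:]]", "[0-9]"),
    ("[[:xdigit:]]", "[A-Fa-f0-9]"),
    ("[[:lower:]]", "[a-z]"),
    ("[[:upper:]]", "[A-Z]"),
    ("[[:space:]]", "[\\t\\r\\n\\f\\v ]") ]

-- the inner `for src, dst in _TOKENS: if pattern.startswith(src, i)` loop (for/else)
def pvFindTok : List (String × String) → List Char → Option (String × String)
  | [], _ => none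
  | (src, dst) :: rest, rem =>
      if PySem.Chars.startswith rem src.toList then some (src, dst) else pvFindTok rest rem

-- needed by the loop's termination: a found token is one of _TOKENS, and it is a prefix of the rest
theorem pvFindTok_mem : ∀ (toks : List (String × String)) (rem : List Char) (sd : String × String),
    pvFindTok toks rem = some sd → sd ∈ toks ∧ sd.1.toList <+: rem := by
  intro toks
  induction toks with
  | nil => intro rem sd h; simp [pvFindTok] at h
  | cons kv rest ih =>
      intro rem sd h
      obtain ⟨src, dst⟩ := kv
      by_cases hp : PySem.Chars.startswith rem src.toList
      · simp [pvFindTok, hp] at h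
        subst h
        exact ⟨List.mem_cons_self, (List.isPrefixOf_iff_prefix).1 (by simpa [PySem.Chars.startswith] using hp)⟩
      · simp [pvFindTok, hp] at h
        obtain ⟨h1, h2⟩ := ih rem sd h
        exact ⟨List.mem_cons_of_mem _ h1, h2⟩

theorem pvTokens_key_ne_nil : ∀ sd ∈ pvTokens, sd.1.toList ≠ [] := by decide

-- the `while i < n` loop: `rem` is the rest of the pattern from i, `out` the list of pieces
def pvScanLoop (rem : List Char) (out : List String) : List String :=
  match rem with
  | [] => out
  | c :: t =>
      match htok : pvFindTok pvTokens (c :: t) with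
      | some (src, dst) => pvScanLoop ((c :: t).drop src.toList.length) (out ++ [dst])
      | none => pvScanLoop t (out ++ [String.ofList [c]])
termination_by rem.length
decreasing_by
  · have h := pvFindTok_mem pvTokens (c :: t) (src, dst) htok
    have hne := pvTokens_key_ne_nil _ h.1
    have : 1 ≤ src.toList.length := by
      cases hsl : src.toList with
      | nil => exact absurd hsl hne
      | cons a l => simp
    simp only [List.length_drop, List.length_cons]
    omega
  · simp

def fix_regex_alt (pattern : String) : String :=
  let p := PySem.Str.join "" (pvScanLoop pattern.toList [])
  if PySem.Str.isIn "(?i)" p then "(?i)" ++ PySem.Str.replace p "(?i)" "" else p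

-- ===== PRECONDITION & SPEC =====
def Spec_fix_regex (pattern : String) (out : String) : Prop := out = fix_regex_alt pattern
instance (pattern : String) (out : String) : Decidable (Spec_fix_regex pattern out) := by unfold Spec_fix_regex; infer_instance

-- ===== CLAIM (what is proved, stated in full; the proofs are below) =====
def Claim_equal_fix_regex : Prop := ∀ (pattern : String), Dom_fix_regex pattern → Spec_fix_regex pattern (fix_regex pattern)

-- ===== LEMMAS AND PROOFS =====

-- ---- a structural model of PySem.Chars.replace (for a nonempty needle) ----
def replR (old new : List Char) : List Char → List Char
  | [] => []
  | c :: t =>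
      if old ≠ [] ∧ old.isPrefixOf (c :: t) then
        new ++ replR old new ((c :: t).drop old.length)
      else
        c :: replR old new t
termination_by s => s.length
decreasing_by
  · rename_i h
    have : 1 ≤ old.length := by
      cases hol : old with
      | nil => exact absurd hol h.1
      | cons a l => simp
    simp only [List.length_drop, List.length_cons]
    omega
  · simp

theorem replR_go (old new : List Char) (h : old ≠ []) :
    ∀ (fuel : Nat) (s acc : List Char), s.length ≤ fuel →
      PySem.Chars.replace.go old new fuel s acc = acc.reverse ++ replR old new s := by
  intro fuel
  induction fuel with
  | zero =>
      intro s acc hs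
      have : s = [] := List.eq_nil_of_length_eq_zero (Nat.le_zero.1 hs)
      subst this
      simp [PySem.Chars.replace.go, replR]
  | succ n ih =>
      intro s acc hs
      cases s with
      | nil => simp [PySem.Chars.replace.go, replR]
      | cons c t =>
          by_cases hp : old.isPrefixOf (c :: t)
          · rw [show PySem.Chars.replace.go old new (n+1) (c :: t) acc
                = PySem.Chars.replace.go old new n ((c :: t).drop old.length) (new.reverse ++ acc) by
              simp [PySem.Chars.replace.go, hp]]
            rw [ih _ _ (by
              have : 1 ≤ old.length := by
                cases hol : old with
                | nil => exact absurd hol h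
                | cons a l => simp
              simp only [List.length_drop, List.length_cons]
              simp only [List.length_cons] at hs
              omega)]
            rw [show replR old new (c :: t) = new ++ replR old new ((c :: t).drop old.length) by
              rw [replR]; simp [h, hp]]
            simp
          · rw [show PySem.Chars.replace.go old new (n+1) (c :: t) acc
                = PySem.Chars.replace.go old new n t (c :: acc) by
              simp [PySem.Chars.replace.go, hp]]
            rw [ih _ _ (by simp only [List.length_cons] at hs; omega)]
            rw [show replR old new (c :: t) = c :: replR old new t by
              rw [replR]; simp [hp]]
            simp

theorem replace_eq_replR (s old new : List Char) (h : old ≠ []) :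
    PySem.Chars.replace s old new = replR old new s := by
  rw [PySem.Chars.replace]
  simp only [List.isEmpty_iff]
  rw [if_neg h]
  simpa using replR_go old new h s.length s [] le_rfl

theorem replR_cons_neg {old : List Char} (new : List Char) {c : Char} {t : List Char}
    (h : ¬ old <+: (c :: t)) : replR old new (c :: t) = c :: replR old new t := by
  rw [replR]
  rw [if_neg]
  intro ⟨_, hp⟩
  exact h ((List.isPrefixOf_iff_prefix).1 hp)

theorem replR_match {old : List Char} (new : List Char) (h : old ≠ []) (u : List Char) :
    replR old new (old ++ u) = new ++ replR old new u := by
  cases hol : old with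
  | nil => exact absurd hol h
  | cons a l =>
      rw [← hol]
      rw [show old ++ u = (old ++ u).headI :: (old ++ u).tail by
        cases hou : old ++ u with
        | nil => simp [hol] at hou
        | cons x xs => simp]
      rw [replR]
      rw [if_pos ⟨h, by
        rw [List.isPrefixOf_iff_prefix]
        rw [show (old ++ u).headI :: (old ++ u).tail = old ++ u by
          cases hou : old ++ u with
          | nil => simp [hol] at hou
          | cons x xs => simp]
        exact List.prefix_append old u⟩]
      congr 1
      · rw [show (old ++ u).headI :: (old ++ u).tail = old ++ u by
          cases hou : old ++ u with
          | nil => simp [hol] at hou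
          | cons x xs => simp]
        rw [List.drop_left]

-- prefix decomposition across an append
theorem prefix_append_cases {p a b : List Char} (h : p <+: a ++ b) :
    p <+: a ∨ (a <+: p ∧ p.drop a.length <+: b) := by
  by_cases hl : p.length ≤ a.length
  · exact Or.inl ((List.isPrefix_append_of_length hl).1 h)
  · right
    have hp := List.prefix_iff_eq_take.1 h
    rw [List.take_append] at hp
    have ha : List.take p.length a = a := List.take_of_length_le (by omega)
    rw [ha] at hp
    constructor
    · exact ⟨List.take (p.length - a.length) b, hp.symm⟩
    · rw [hp, List.drop_left]
      exact List.take_prefix _ _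

-- replR passes over a block w none of whose suffixes interacts with the needle
theorem replR_pass (old new : List Char)
    (w : List Char)
    (hw : ∀ j, j < w.length → ¬ old <+: w.drop j ∧ ¬ w.drop j <+: old) :
    ∀ X, replR old new (w ++ X) = w ++ replR old new X := by
  induction w with
  | nil => intro X; simp
  | cons c w' ih =>
      intro X
      have h0 := hw 0 (by simp)
      simp only [List.drop_zero] at h0
      have hnp : ¬ old <+: (c :: w') ++ X := by
        intro hpf
        rcases prefix_append_cases hpf with h1 | ⟨h1, _⟩
        · exact h0.1 h1
        · exact h0.2 h1
      rw [List.cons_append, replR_cons_neg new (by simpa using hnp)]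
      rw [show w' ++ X = w' ++ X from rfl]
      rw [ih (fun j hj => by
        have := hw (j+1) (by simp; omega)
        simpa using this)]
      simp

-- a key k' that cannot reach into the replacement text `new` finds no new occurrence
theorem replR_nc (old new k' : List Char)
    (hnew : ∀ j, j < k'.length → ¬ k'.drop j <+: new ∧ ¬ new <+: k'.drop j) :
    ∀ (n : Nat) (s pre : List Char), s.length ≤ n →
      k' <+: pre ++ replR old new s → k' <+: pre ++ s := by
  intro n
  induction n with
  | zero =>
      intro s pre hs h
      have : s = [] := List.eq_nil_of_length_eq_zero (Nat.le_zero.1 hs)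
      subst this
      simpa [replR] using h
  | succ m ih =>
      intro s pre hs h
      cases s with
      | nil => simpa [replR] using h
      | cons c t =>
          by_cases hp : old ≠ [] ∧ old.isPrefixOf (c :: t)
          · have hpre : old <+: (c :: t) := (List.isPrefixOf_iff_prefix).1 hp.2
            obtain ⟨u, hu⟩ := hpre
            have hrepl : replR old new (c :: t) = new ++ replR old new u := by
              rw [← hu, replR_match new hp.1]
            rw [hrepl] at h
            rcases prefix_append_cases h with h1 | ⟨h1, h2⟩
            · exact h1.trans (List.prefix_append pre (c :: t))
            · -- pre <+: k'
              by_cases hlen : k'.length ≤ pre.length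
              · have : k' = pre := List.IsPrefix.eq_of_length_le h1 (by omega) |>.symm
                subst this
                exact List.prefix_append k' (c :: t)
              · exfalso
                have hj := hnew pre.length (by omega)
                rcases prefix_append_cases h2 with h3 | ⟨h3, _⟩
                · exact hj.1 h3
                · exact hj.2 h3
          · have hre : replR old new (c :: t) = c :: replR old new t := by
              rw [replR, if_neg hp]
            rw [hre] at h
            have h' : k' <+: (pre ++ [c]) ++ replR old new t := by
              simpa [List.append_assoc] using h
            have := ih t (pre ++ [c]) (by simp at hs ⊢; omega) h'
            simpa [List.append_assoc] using this

-- ---- the chain of replaces, over a token list ----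
def chainL (L : List (List Char × List Char)) (s : List Char) : List Char :=
  L.foldl (fun p kv => replR kv.1 kv.2 p) s

theorem chainL_nil_str : ∀ L, chainL L [] = [] := by
  intro L
  induction L with
  | nil => rfl
  | cons kv L' ih => simpa [chainL, List.foldl, replR] using ih

-- the char-level first-token finder (mirrors pvFindTok after toList)
def firstTokL : List (List Char × List Char) → List Char → Option (List Char × List Char)
  | [], _ => none
  | kv :: rest, s => if kv.1.isPrefixOf s then some kv else firstTokL rest s

theorem pvFindTok_toList : ∀ (toks : List (String × String)) (rem : List Char),
    firstTokL (toks.map (fun sd => (sd.1.toList, sd.2.toList))) rem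
      = (pvFindTok toks rem).map (fun sd => (sd.1.toList, sd.2.toList)) := by
  intro toks
  induction toks with
  | nil => intro rem; simp [pvFindTok, firstTokL]
  | cons kv rest ih =>
      intro rem
      obtain ⟨src, dst⟩ := kv
      by_cases hp : src.toList.isPrefixOf rem
      · simp [pvFindTok, firstTokL, hp, PySem.Chars.startswith]
      · simp [pvFindTok, firstTokL, hp, PySem.Chars.startswith, ih rem]

def KL : List (List Char × List Char) := pvTokens.map (fun sd => (sd.1.toList, sd.2.toList))

theorem KL_fact1 : ∀ sd ∈ KL, sd.1 ≠ [] := by decide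

theorem KL_fact2 : ∀ sd ∈ KL, ∀ kv ∈ KL, kv.1 ≠ sd.1 →
    ∀ j, j < sd.1.length → ¬ kv.1 <+: sd.1.drop j ∧ ¬ sd.1.drop j <+: kv.1 := by decide

theorem KL_fact3 : ∀ sd ∈ KL, ∀ kv ∈ KL,
    ∀ j, j < sd.2.length → ¬ kv.1 <+: sd.2.drop j ∧ ¬ sd.2.drop j <+: kv.1 := by decide

theorem KL_fact4 : ∀ kv ∈ KL, ∀ kv' ∈ KL,
    ∀ j, j < kv'.1.length → ¬ kv'.1.drop j <+: kv.2 ∧ ¬ kv.2 <+: kv'.1.drop j := by decide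

theorem firstTokL_mem : ∀ (L : List (List Char × List Char)) (s : List Char) (kv : List Char × List Char),
    firstTokL L s = some kv → kv ∈ L ∧ kv.1 <+: s := by
  intro L
  induction L with
  | nil => intro s kv h; simp [firstTokL] at h
  | cons kv0 rest ih =>
      intro s kv h
      by_cases hp : kv0.1.isPrefixOf s
      · simp [firstTokL, hp] at h
        subst h
        exact ⟨List.mem_cons_self, (List.isPrefixOf_iff_prefix).1 hp⟩
      · simp [firstTokL, hp] at h
        obtain ⟨h1, h2⟩ := ih s kv h
        exact ⟨List.mem_cons_of_mem _ h1, h2⟩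

theorem firstTokL_none : ∀ (L : List (List Char × List Char)) (s : List Char),
    firstTokL L s = none → ∀ kv ∈ L, ¬ kv.1 <+: s := by
  intro L
  induction L with
  | nil => intro s _ kv h; simp at h
  | cons kv0 rest ih =>
      intro s h kv hm
      by_cases hp : kv0.1.isPrefixOf s
      · simp [firstTokL, hp] at h
      · simp [firstTokL, hp] at h
        rcases List.mem_cons.1 hm with rfl | hm'
        · intro hc; exact hp ((List.isPrefixOf_iff_prefix).2 hc)
        · exact ih s h kv hm'

-- the chain passes over a block w that no token key interacts with
theorem chain_pass : ∀ (L : List (List Char × List Char)) (w : List Char),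
    (∀ kv ∈ L, ∀ j, j < w.length → ¬ kv.1 <+: w.drop j ∧ ¬ w.drop j <+: kv.1) →
    ∀ X, chainL L (w ++ X) = w ++ chainL L X := by
  intro L
  induction L with
  | nil => intro w _ X; rfl
  | cons kv L' ih =>
      intro w hw X
      have h1 : replR kv.1 kv.2 (w ++ X) = w ++ replR kv.1 kv.2 X :=
        replR_pass kv.1 kv.2 w (hw kv List.mem_cons_self) X
      simp only [chainL, List.foldl] at *
      rw [h1]
      exact ih w (fun kv' hm => hw kv' (List.mem_cons_of_mem _ hm)) _

-- one consumed token: the chain rewrites src ++ u to dst ++ (chain of u)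
theorem chain_match : ∀ (L : List (List Char × List Char)) (src dst u₀ : List Char),
    src ≠ [] →
    (∀ kv ∈ L, kv.1 ≠ src → ∀ j, j < src.length → ¬ kv.1 <+: src.drop j ∧ ¬ src.drop j <+: kv.1) →
    (∀ kv ∈ L, ∀ j, j < dst.length → ¬ kv.1 <+: dst.drop j ∧ ¬ dst.drop j <+: kv.1) →
    firstTokL L (src ++ u₀) = some (src, dst) →
    ∀ u, chainL L (src ++ u) = dst ++ chainL L u := by
  intro L
  induction L with
  | nil => intro src dst u₀ _ _ _ h; simp [firstTokL] at h
  | cons kv0 L' ih =>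
      intro src dst u₀ hne hpsrc hpdst hfirst u
      obtain ⟨k0, v0⟩ := kv0
      by_cases hp : k0.isPrefixOf (src ++ u₀)
      · simp only [firstTokL, hp, if_pos, Option.some.injEq, Prod.mk.injEq] at hfirst
        obtain ⟨h1, h2⟩ := hfirst
        subst h1; subst h2
        simp only [chainL, List.foldl]
        rw [replR_match v0 hne u]
        have := chain_pass L' v0 (fun kv hm => hpdst kv (List.mem_cons_of_mem _ hm)) (replR k0 v0 u)
        simpa [chainL, List.foldl] using this
      · simp only [firstTokL, hp, Bool.false_eq_true, if_false] at hfirst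
        have hnp0 : ¬ k0 <+: src ++ u₀ := fun hc => hp ((List.isPrefixOf_iff_prefix).2 hc)
        have hknes : k0 ≠ src := by
          rintro rfl
          exact hnp0 (List.prefix_append _ _)
        have hsfacts := hpsrc (k0, v0) List.mem_cons_self hknes
        have hpass : replR k0 v0 (src ++ u) = src ++ replR k0 v0 u :=
          replR_pass k0 v0 src hsfacts u
        simp only [chainL, List.foldl]
        rw [hpass]
        have := ih src dst u₀ hne
          (fun kv hm => hpsrc kv (List.mem_cons_of_mem _ hm))
          (fun kv hm => hpdst kv (List.mem_cons_of_mem _ hm))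
          hfirst (replR k0 v0 u)
        simpa [chainL] using this

-- no token matches at the head: the chain keeps c
theorem chain_nomatch : ∀ (L : List (List Char × List Char)),
    (∀ kv ∈ L, ∀ kv' ∈ L, ∀ j, j < kv'.1.length → ¬ kv'.1.drop j <+: kv.2 ∧ ¬ kv.2 <+: kv'.1.drop j) →
    ∀ (c : Char) (t : List Char),
    (∀ kv ∈ L, ¬ kv.1 <+: c :: t) →
    chainL L (c :: t) = c :: chainL L t := by
  intro L
  induction L with
  | nil => intro _ c t _; rfl
  | cons kv0 L' ih =>
      intro hfacts c t hnm
      have h0 : replR kv0.1 kv0.2 (c :: t) = c :: replR kv0.1 kv0.2 t :=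
        replR_cons_neg kv0.2 (hnm kv0 List.mem_cons_self)
      simp only [chainL, List.foldl]
      rw [h0]
      have := ih
        (fun kv hm kv' hm' => hfacts kv (List.mem_cons_of_mem _ hm) kv' (List.mem_cons_of_mem _ hm'))
        c (replR kv0.1 kv0.2 t)
        (fun kv hm hc => by
          have hnc := replR_nc kv0.1 kv0.2 kv.1
            (fun j hj => hfacts kv0 List.mem_cons_self kv (List.mem_cons_of_mem _ hm) j hj)
            t.length t [c] le_rfl (by simpa using hc)
          exact hnm kv (List.mem_cons_of_mem _ hm) (by simpa using hnc))
      simpa [chainL] using this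

-- the scan result, as a pure function of the remaining characters
def scanF : List Char → List Char
  | [] => []
  | c :: t =>
      match htok : firstTokL KL (c :: t) with
      | some kv => kv.2 ++ scanF ((c :: t).drop kv.1.length)
      | none => c :: scanF t
termination_by s => s.length
decreasing_by
  · have h := firstTokL_mem KL (c :: t) kv htok
    have hne := KL_fact1 _ h.1
    have : 1 ≤ kv.1.length := by
      cases hkl : kv.1 with
      | nil => exact absurd hkl hne
      | cons a l => simp
    simp only [List.length_drop, List.length_cons]
    omega
  · simp

theorem scanF_cons_some (c : Char) (t : List Char) (kv : List Char × List Char)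
    (h : firstTokL KL (c :: t) = some kv) :
    scanF (c :: t) = kv.2 ++ scanF ((c :: t).drop kv.1.length) := by
  rw [scanF]
  split
  · rename_i kv' h'
    rw [h'] at h
    cases h
    rfl
  · rename_i h'
    rw [h'] at h
    cases h

theorem scanF_cons_none (c : Char) (t : List Char)
    (h : firstTokL KL (c :: t) = none) :
    scanF (c :: t) = c :: scanF t := by
  rw [scanF]
  split
  · rename_i kv' h'
    rw [h'] at h
    cases h
  · rfl

theorem pvScanLoop_nil (out : List String) : pvScanLoop [] out = out := by
  rw [pvScanLoop]

theorem pvScanLoop_cons_some (c : Char) (t : List Char) (out : List String)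
    (src dst : String) (h : pvFindTok pvTokens (c :: t) = some (src, dst)) :
    pvScanLoop (c :: t) out = pvScanLoop ((c :: t).drop src.toList.length) (out ++ [dst]) := by
  rw [pvScanLoop]
  split
  · rename_i src' dst' h'
    rw [h'] at h
    cases h
    rfl
  · rename_i h'
    rw [h'] at h
    cases h

theorem pvScanLoop_cons_none (c : Char) (t : List Char) (out : List String)
    (h : pvFindTok pvTokens (c :: t) = none) :
    pvScanLoop (c :: t) out = pvScanLoop t (out ++ [String.ofList [c]]) := by
  rw [pvScanLoop]
  split
  · rename_i src' dst' h'
    rw [h'] at h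
    cases h
  · rfl

-- MAIN: the eight-pass chain computes the single-pass scan
theorem chain_eq_scan : ∀ (n : Nat) (s : List Char), s.length ≤ n → chainL KL s = scanF s := by
  intro n
  induction n with
  | zero =>
      intro s hs
      have : s = [] := List.eq_nil_of_length_eq_zero (Nat.le_zero.1 hs)
      subst this
      rw [chainL_nil_str, scanF]
  | succ m ih =>
      intro s hs
      cases s with
      | nil => rw [chainL_nil_str, scanF]
      | cons c t =>
          cases htok : firstTokL KL (c :: t) with
          | some kv =>
              obtain ⟨hm, hpre⟩ := firstTokL_mem KL (c :: t) kv htok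
              obtain ⟨u, hu⟩ := hpre
              have hne := KL_fact1 _ hm
              have hlen : 1 ≤ kv.1.length := by
                cases hkl : kv.1 with
                | nil => exact absurd hkl hne
                | cons a l => simp
              have hdrop : (c :: t).drop kv.1.length = u := by
                rw [← hu, List.drop_left]
              have hchain : chainL KL (c :: t) = kv.2 ++ chainL KL u := by
                rw [← hu]
                exact chain_match KL kv.1 kv.2 u hne
                  (fun kv' hm' => KL_fact2 kv hm kv' hm')
                  (fun kv' hm' => KL_fact3 kv hm kv' hm')
                  (by rw [hu]; exact htok) u
              rw [hchain, scanF_cons_some c t kv htok, hdrop]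
              congr 1
              exact ih u (by
                have : u.length + kv.1.length = t.length + 1 := by
                  have := congrArg List.length hu
                  simp at this
                  omega
                simp only [List.length_cons] at hs
                omega)
          | none =>
              have hnm := firstTokL_none KL (c :: t) htok
              rw [chain_nomatch KL KL_fact4 c t hnm, scanF_cons_none c t htok]
              congr 1
              exact ih t (by simp at hs; omega)

-- joining the scan loop's pieces gives scanF
theorem pyjoin_flatten : ∀ (parts : List (List Char)), PySem.Chars.join [] parts = parts.flatten := by
  intro parts
  induction parts with
  | nil => rfl
  | cons p ps ih =>
      cases ps with
      | nil => simp [PySem.Chars.join, List.intercalate]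
      | cons q qs =>
          simp [PySem.Chars.join, List.intercalate, List.intersperse] at *
          simpa using ih

theorem scanLoop_eq : ∀ (n : Nat) (rem : List Char), rem.length ≤ n → ∀ (out : List String),
    ((pvScanLoop rem out).map String.toList).flatten
      = (out.map String.toList).flatten ++ scanF rem := by
  intro n
  induction n with
  | zero =>
      intro rem hs out
      have : rem = [] := List.eq_nil_of_length_eq_zero (Nat.le_zero.1 hs)
      subst this
      rw [pvScanLoop_nil, scanF]
      simp
  | succ m ih =>
      intro rem hs out
      cases rem with
      | nil =>
          rw [pvScanLoop_nil, scanF]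
          simp
      | cons c t =>
          cases htok : pvFindTok pvTokens (c :: t) with
          | some sd =>
              obtain ⟨src, dst⟩ := sd
              have hKL : firstTokL KL (c :: t) = some (src.toList, dst.toList) := by
                rw [KL, pvFindTok_toList, htok]; rfl
              obtain ⟨hm, hpre⟩ := pvFindTok_mem pvTokens (c :: t) (src, dst) htok
              have hne := pvTokens_key_ne_nil _ hm
              have hlen : 1 ≤ src.toList.length := by
                cases hkl : src.toList with
                | nil => exact absurd hkl hne
                | cons a l => simp
              rw [pvScanLoop_cons_some c t out src dst htok]
              rw [ih _ (by
                simp only [List.length_drop, List.length_cons]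
                simp only [List.length_cons] at hs
                omega) (out ++ [dst])]
              rw [scanF_cons_some c t (src.toList, dst.toList) hKL]
              simp [List.append_assoc]
          | none =>
              rw [pvScanLoop_cons_none c t out htok]
              rw [ih t (by simp at hs; omega) (out ++ [String.ofList [c]])]
              have hKL : firstTokL KL (c :: t) = none := by
                rw [KL, pvFindTok_toList, htok]; rfl
              rw [scanF_cons_none c t hKL]
              simp

-- A's replace pipeline, on the character level, is the chain over KL
theorem fixA_chain (pattern : String) :
    (pvPosixMap.foldl (fun q sd => PySem.Str.replace q sd.1 sd.2)
        (PySem.Str.replace pattern "\\z" "$")).toList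
      = chainL KL pattern.toList := by
  simp only [pvPosixMap, List.foldl]
  simp only [PySem.Str.replace, String.toList_ofList]
  rw [replace_eq_replR _ _ _ (by decide), replace_eq_replR _ _ _ (by decide),
      replace_eq_replR _ _ _ (by decide), replace_eq_replR _ _ _ (by decide),
      replace_eq_replR _ _ _ (by decide), replace_eq_replR _ _ _ (by decide),
      replace_eq_replR _ _ _ (by decide), replace_eq_replR _ _ _ (by decide)]
  simp only [KL, pvTokens, List.map, chainL, List.foldl]

-- B's joined scan, on the character level, is scanF
theorem fixB_scan (pattern : String) :
    (PySem.Str.join "" (pvScanLoop pattern.toList [])).toList = scanF pattern.toList := by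
  simp only [PySem.Str.join, String.toList_ofList]
  rw [show ("" : String).toList = [] from rfl]
  rw [pyjoin_flatten]
  simpa using scanLoop_eq pattern.toList.length pattern.toList le_rfl []

-- ===== VERDICT (by name: the statement is the Claim_ definition above) =====
theorem fix_regex_spec : Claim_equal_fix_regex := by
  intro pattern _
  have hp : pvPosixMap.foldl (fun q sd => PySem.Str.replace q sd.1 sd.2)
      (PySem.Str.replace pattern "\\z" "$")
      = PySem.Str.join "" (pvScanLoop pattern.toList []) := by
    apply String.toList_inj.1
    rw [fixA_chain, fixB_scan]
    exact chain_eq_scan pattern.toList.length pattern.toList le_rfl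
  show fix_regex pattern = fix_regex_alt pattern
  have hA : fix_regex pattern =
      (if PySem.Str.isIn "(?i)" (pvPosixMap.foldl (fun q sd => PySem.Str.replace q sd.1 sd.2)
          (PySem.Str.replace pattern "\\z" "$")) then
        "(?i)" ++ PySem.Str.replace (pvPosixMap.foldl (fun q sd => PySem.Str.replace q sd.1 sd.2)
          (PySem.Str.replace pattern "\\z" "$")) "(?i)" ""
      else pvPosixMap.foldl (fun q sd => PySem.Str.replace q sd.1 sd.2)
          (PySem.Str.replace pattern "\\z" "$")) := rfl
  have hB : fix_regex_alt pattern =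
      (if PySem.Str.isIn "(?i)" (PySem.Str.join "" (pvScanLoop pattern.toList [])) then
        "(?i)" ++ PySem.Str.replace (PySem.Str.join "" (pvScanLoop pattern.toList [])) "(?i)" ""
      else PySem.Str.join "" (pvScanLoop pattern.toList [])) := rfl
  rw [hA, hB, hp]
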